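-- pv_equiv track=rewrite | github.com/vladimiracunadev-create/python-data-science-bootcamp | scripts/generate_class_assets.py | split_h2_sections
-- ===== SOURCE A (Python) =====
-- def strip_first_h1(markdown_text: str) -> str:
--     """Quita el primer H1 para evitar duplicarlo en PDF/PPTX."""
--     lines = markdown_text.splitlines()
--     for index, line in enumerate(lines):
--         if line.startswith("# "):
--             return "\n".join(lines[index + 1 :]).lstrip()
--     return markdown_text
--
-- def split_h2_sections(markdown_text: str) -> list[tuple[str, str]]:
--     """Divide un markdown en secciones a nivel `##` preservando orden."""
--     body = strip_first_h1(markdown_text)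
--     sections: list[tuple[str, list[str]]] = []
--     current_title: str | None = None
--     current_lines: list[str] = []
--
--     for line in body.splitlines():
--         if line.startswith("## "):
--             if current_title is not None:
--                 sections.append((current_title, current_lines[:]))
--             current_title = line[3:].strip()
--             current_lines = []
--         else:
--             current_lines.append(line)
--
--     if current_title is not None:
--         sections.append((current_title, current_lines[:]))
--
--     return [(title, "\n".join(lines).strip()) for title, lines in sections]
-- ===== SOURCE B (Python) =====
-- def split_h2_sections(markdown_text: str) -> list[tuple[str, str]]:
--     """Divide un markdown en secciones a nivel `##` preservando orden."""
--     lines = markdown_text.splitlines()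
--     body_lines = lines
--     for index, line in enumerate(lines):
--         if line.startswith("# "):
--             body_lines = "\n".join(lines[index + 1:]).lstrip().splitlines()
--             break
--
--     def sections(rest):
--         # skip anything before the next H2, then cut one section off the front
--         while rest and not rest[0].startswith("## "):
--             rest = rest[1:]
--         if not rest:
--             return []
--         title = rest[0][3:].strip()
--         tail = rest[1:]
--         j = 0
--         while j < len(tail) and not tail[j].startswith("## "):
--             j += 1
--         return [(title, "\n".join(tail[:j]).strip())] + sections(tail[j:])
--
--     return sections(body_lines)
-- ===== Notes on version B (the rewrite author's own statement) =====
-- stated objective: alternative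
-- what changed: Replaces A's single-pass streaming state machine (optional current title + growing line accumulator + deferred join/strip pass) with an index-and-slice decomposition: scan for the next H2 heading position, cut each section out of the line list by slicing between consecutive heading indices, and emit it immediately.
import Mathlib
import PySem

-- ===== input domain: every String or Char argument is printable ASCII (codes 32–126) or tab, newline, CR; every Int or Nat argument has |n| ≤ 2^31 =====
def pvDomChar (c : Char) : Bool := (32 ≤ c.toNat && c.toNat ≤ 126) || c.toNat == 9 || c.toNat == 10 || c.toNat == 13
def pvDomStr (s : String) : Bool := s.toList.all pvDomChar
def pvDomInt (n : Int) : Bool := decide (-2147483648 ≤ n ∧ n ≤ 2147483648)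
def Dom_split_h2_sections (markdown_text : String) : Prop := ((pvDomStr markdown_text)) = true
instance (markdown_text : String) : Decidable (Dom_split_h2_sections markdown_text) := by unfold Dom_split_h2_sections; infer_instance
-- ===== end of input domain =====

-- B replaces A's streaming state machine with a next-heading index scan plus slices; alternative decomposition, same cost.

-- ===== PORT A =====
-- helper strip_first_h1: the enumerate loop, carrying the tail lines[index+1:]
def stripH1Go : List String → Option String
  | [] => none
  | l :: ls =>
    if PySem.Str.startswith l "# " then some (PySem.Str.lstrip (PySem.Str.join "\n" ls))
    else stripH1Go ls

def strip_first_h1 (markdown_text : String) : String :=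
  (stripH1Go (PySem.Str.splitlines markdown_text)).getD markdown_text

-- loop state: (current_title, current_lines, sections)
def stepA (st : Option String × List String × List (String × List String)) (line : String) :
    Option String × List String × List (String × List String) :=
  if PySem.Str.startswith line "## " then
    match st.1 with
    | some t => (some (PySem.Str.strip (PySem.Str.slice line (some 3) none)), [], st.2.2 ++ [(t, st.2.1)])
    | none   => (some (PySem.Str.strip (PySem.Str.slice line (some 3) none)), [], st.2.2)
  else (st.1, st.2.1 ++ [line], st.2.2)

def split_h2_sections (markdown_text : String) : List (String × String) :=
  let body := strip_first_h1 markdown_text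
  let fin := (PySem.Str.splitlines body).foldl stepA (none, [], [])
  let secs := match fin.1 with
    | some t => fin.2.2 ++ [(t, fin.2.1)]
    | none   => fin.2.2
  secs.map (fun tl => (tl.1, PySem.Str.strip (PySem.Str.join "\n" tl.2)))

-- ===== PORT B =====
-- the for-index,line loop computing body_lines, carrying the tail lines[index+1:]
def altBodyGo : List String → Option (List String)
  | [] => none
  | l :: ls =>
    if PySem.Str.startswith l "# " then
      some (PySem.Str.splitlines (PySem.Str.lstrip (PySem.Str.join "\n" ls)))
    else altBodyGo ls

-- next_heading(ls, k): first index ≥ k whose line starts with "## ", else len(ls)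
def nextHeading (ls : List String) (k : Nat) : Nat :=
  if h : k < ls.length then
    if PySem.Str.startswith ls[k] "## " then k else nextHeading ls (k + 1)
  else ls.length
termination_by ls.length - k

-- needed by altLoop's decreasing_by
theorem le_nextHeading (ls : List String) (k : Nat) (hk : k ≤ ls.length) : k ≤ nextHeading ls k := by
  rw [nextHeading]
  split
  · split
    · exact le_refl k
    · exact le_trans (Nat.le_succ k) (le_nextHeading ls (k + 1) (by omega))
  · omega
termination_by ls.length - k

def altLoop (ls : List String) (i : Nat) (out : List (String × String)) : List (String × String) :=
  if h : i < ls.length then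
    let j := nextHeading ls (i + 1)
    altLoop ls j
      (out ++ [(PySem.Str.strip (PySem.Str.slice ls[i] (some 3) none),
                PySem.Str.strip (PySem.Str.join "\n" (PySem.List.slice ls (some ((i : Int) + 1)) (some (j : Int)))))])
  else out
termination_by ls.length - i
decreasing_by
  have h1 : i + 1 ≤ nextHeading ls (i + 1) := le_nextHeading ls (i + 1) h
  omega

def split_h2_sections_alt (markdown_text : String) : List (String × String) :=
  let lines := PySem.Str.splitlines markdown_text
  let bodyLines := (altBodyGo lines).getD lines
  altLoop bodyLines (nextHeading bodyLines 0) []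

-- ===== PRECONDITION & SPEC =====
def Spec_split_h2_sections (markdown_text : String) (out : List (String × String)) : Prop := out = split_h2_sections_alt markdown_text
instance (markdown_text : String) (out : List (String × String)) : Decidable (Spec_split_h2_sections markdown_text out) := by unfold Spec_split_h2_sections; infer_instance

-- ===== CLAIM (what is proved, stated in full; the proofs are below) =====
def Claim_equal_split_h2_sections : Prop := ∀ (markdown_text : String), Dom_split_h2_sections markdown_text → Spec_split_h2_sections markdown_text (split_h2_sections markdown_text)

-- ===== LEMMAS AND PROOFS =====

-- common spec vocabulary
def notH2 (x : String) : Bool := !PySem.Str.startswith x "## "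

def secOf (l : String) (content : List String) : String × String :=
  (PySem.Str.strip (PySem.Str.slice l (some 3) none), PySem.Str.strip (PySem.Str.join "\n" content))

-- the section list, described by takeWhile/dropWhile between headings
def splitRec (xs : List String) : List (String × String) :=
  match h : xs.dropWhile notH2 with
  | [] => []
  | l :: ls' => secOf l (ls'.takeWhile notH2) :: splitRec (ls'.dropWhile notH2)
termination_by xs.length
decreasing_by
  have h1 := List.length_dropWhile_le notH2 xs
  have h2 := List.length_dropWhile_le notH2 ls'
  rw [h] at h1; simp at h1; omega

theorem splitRec_eq_nil (xs : List String) (h : xs.dropWhile notH2 = []) : splitRec xs = [] := by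
  rw [splitRec]; split <;> simp_all

theorem splitRec_eq_cons (xs : List String) (l : String) (ls' : List String)
    (h : xs.dropWhile notH2 = l :: ls') :
    splitRec xs = secOf l (ls'.takeWhile notH2) :: splitRec (ls'.dropWhile notH2) := by
  rw [splitRec]; split <;> simp_all

theorem splitRec_cons_skip (l : String) (ls : List String) (h : notH2 l = true) :
    splitRec (l :: ls) = splitRec ls := by
  have hd : (l :: ls).dropWhile notH2 = ls.dropWhile notH2 := by simp [h]
  cases hls : ls.dropWhile notH2 with
  | nil => rw [splitRec_eq_nil _ (hd.trans hls), splitRec_eq_nil _ hls]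
  | cons a as => rw [splitRec_eq_cons _ _ _ (hd.trans hls), splitRec_eq_cons _ _ _ hls]

theorem splitRec_dropWhile (xs : List String) : splitRec (xs.dropWhile notH2) = splitRec xs := by
  have hi := List.dropWhile_idempotent notH2 xs
  cases h : xs.dropWhile notH2 with
  | nil => rw [splitRec_eq_nil _ h]; exact splitRec_eq_nil [] rfl
  | cons a as =>
    rw [h] at hi
    rw [splitRec_eq_cons _ _ _ hi, splitRec_eq_cons _ _ _ h]

-- general list facts specialised (no named Mathlib lemma found for these forms)
theorem dropWhile_eq_drop (p : String → Bool) (xs : List String) :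
    xs.dropWhile p = xs.drop (xs.takeWhile p).length := by
  calc xs.dropWhile p = (xs.takeWhile p ++ xs.dropWhile p).drop (xs.takeWhile p).length :=
        List.drop_left.symm
    _ = xs.drop (xs.takeWhile p).length := by rw [List.takeWhile_append_dropWhile]

theorem takeWhile_eq_take (p : String → Bool) (xs : List String) :
    xs.takeWhile p = xs.take (xs.takeWhile p).length := by
  calc xs.takeWhile p = (xs.takeWhile p ++ xs.dropWhile p).take (xs.takeWhile p).length :=
        List.take_left.symm
    _ = xs.take (xs.takeWhile p).length := by rw [List.takeWhile_append_dropWhile]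

-- ===== A-side: the fold equals splitRec =====
def fA (tl : String × List String) : String × String :=
  (tl.1, PySem.Str.strip (PySem.Str.join "\n" tl.2))

def finA (st : Option String × List String × List (String × List String)) : List (String × String) :=
  (match st.1 with
    | some t => st.2.2 ++ [(t, st.2.1)]
    | none   => st.2.2).map fA

theorem foldA_some (ls : List String) : ∀ (t : String) (cur : List String)
    (secs : List (String × List String)),
    finA (ls.foldl stepA (some t, cur, secs)) =
      secs.map fA ++ fA (t, cur ++ ls.takeWhile notH2) :: splitRec (ls.dropWhile notH2) := by
  induction ls with
  | nil =>
    intro t cur secs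
    simp [finA, List.takeWhile_nil, List.dropWhile_nil, splitRec_eq_nil [] rfl]
  | cons l ls ih =>
    intro t cur secs
    rw [List.foldl_cons]
    by_cases hH : PySem.Str.startswith l "## "
    · have hn : notH2 l = false := by unfold notH2; rw [hH]; rfl
      have hdw : (l :: ls).dropWhile notH2 = l :: ls := by simp [hn]
      rw [show stepA (some t, cur, secs) l
            = (some (PySem.Str.strip (PySem.Str.slice l (some 3) none)), [],
               secs ++ [(t, cur)]) from by unfold stepA; rw [if_pos hH]]
      rw [ih, hdw, splitRec_eq_cons (l :: ls) l ls (by simp [hn])]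
      simp [hn, secOf, fA]
    · have hn : notH2 l = true := by unfold notH2; rw [Bool.not_eq_true] at hH; rw [hH]; rfl
      rw [show stepA (some t, cur, secs) l = (some t, cur ++ [l], secs) from by
            unfold stepA; rw [if_neg hH]]
      rw [ih]
      simp [hn]

theorem foldA_none (ls : List String) : ∀ (cur : List String) (secs : List (String × List String)),
    finA (ls.foldl stepA (none, cur, secs)) = secs.map fA ++ splitRec ls := by
  induction ls with
  | nil => intro cur secs; simp [finA, splitRec_eq_nil [] rfl]
  | cons l ls ih =>
    intro cur secs
    rw [List.foldl_cons]
    by_cases hH : PySem.Str.startswith l "## "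
    · have hn : notH2 l = false := by unfold notH2; rw [hH]; rfl
      rw [show stepA (none, cur, secs) l
            = (some (PySem.Str.strip (PySem.Str.slice l (some 3) none)), [], secs) from by
            unfold stepA; rw [if_pos hH]]
      rw [foldA_some, splitRec_eq_cons (l :: ls) l ls (by simp [hn])]
      simp [secOf, fA]
    · have hn : notH2 l = true := by unfold notH2; rw [Bool.not_eq_true] at hH; rw [hH]; rfl
      rw [show stepA (none, cur, secs) l = (none, cur ++ [l], secs) from by unfold stepA; rw [if_neg hH]]
      rw [ih, splitRec_cons_skip l ls hn]

-- ===== B-side: the index loop equals splitRec =====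
theorem nextHeading_eq (ls : List String) (k : Nat) (hk : k ≤ ls.length) :
    nextHeading ls k = k + ((ls.drop k).takeWhile notH2).length := by
  rw [nextHeading]
  split
  · rename_i h
    have hdrop : ls.drop k = ls[k] :: ls.drop (k + 1) := List.drop_eq_getElem_cons h
    split
    · rename_i hh
      have hn : notH2 ls[k] = false := by unfold notH2; rw [hh]; rfl
      have hTW : (ls.drop k).takeWhile notH2 = [] := by
        rw [hdrop, List.takeWhile_cons, if_neg (by rw [hn]; exact Bool.false_ne_true)]
      rw [hTW, List.length_nil]
      omega
    · rename_i hh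
      have hn : notH2 ls[k] = true := by
        unfold notH2; rw [Bool.not_eq_true] at hh; rw [hh]; rfl
      have hTW : (ls.drop k).takeWhile notH2 = ls[k] :: (ls.drop (k + 1)).takeWhile notH2 := by
        rw [hdrop, List.takeWhile_cons, if_pos hn]
      rw [nextHeading_eq ls (k + 1) (by omega), hTW, List.length_cons]
      omega
  · rename_i h
    have hk' : k = ls.length := by omega
    subst hk'
    simp [List.drop_length]
termination_by ls.length - k

theorem altLoop_eq (ls : List String) (k : Nat) (hk : k ≤ ls.length)
    (out : List (String × String)) :
    altLoop ls (nextHeading ls k) out = out ++ splitRec (ls.drop k) := by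
  have hne := nextHeading_eq ls k hk
  have hkj : k ≤ nextHeading ls k := le_nextHeading ls k hk
  cases hd : (ls.drop k).dropWhile notH2 with
  | nil =>
    have ht : (ls.drop k).takeWhile notH2 = ls.drop k := by
      have h2 := List.takeWhile_append_dropWhile (p := notH2) (l := ls.drop k)
      rw [hd, List.append_nil] at h2
      exact h2
    have hj : nextHeading ls k = ls.length := by
      rw [hne, ht, List.length_drop]; omega
    rw [hj, altLoop]
    simp [splitRec_eq_nil _ hd]
  | cons l ls' =>
    have hdropj : ls.drop (nextHeading ls k) = l :: ls' := by
      rw [hne]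
      rw [show List.drop (k + ((ls.drop k).takeWhile notH2).length) ls
            = List.drop ((ls.drop k).takeWhile notH2).length (List.drop k ls) from by
            rw [List.drop_drop, Nat.add_comm]]
      rw [← dropWhile_eq_drop, hd]
    have hjlt : nextHeading ls k < ls.length := by
      by_contra hc
      rw [List.drop_eq_nil_of_le (by omega)] at hdropj
      simp at hdropj
    have hcons := List.drop_eq_getElem_cons hjlt
    rw [hdropj] at hcons
    have hgl : ls[nextHeading ls k] = l := (List.cons.injEq _ _ _ _).mp hcons.symm |>.1
    have htl : ls.drop (nextHeading ls k + 1) = ls' :=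
      ((List.cons.injEq _ _ _ _).mp hcons.symm |>.2)
    have hj' := nextHeading_eq ls (nextHeading ls k + 1) (by omega)
    have hslice : PySem.List.slice ls (some ((nextHeading ls k : Int) + 1))
        (some ((nextHeading ls (nextHeading ls k + 1) : Int))) = ls'.takeWhile notH2 := by
      rw [show ((nextHeading ls k : Int) + 1) = ((nextHeading ls k + 1 : Nat) : Int) by push_cast; ring,
          PySem.List.slice_natCast, hj', htl]
      rw [show (nextHeading ls k + 1 + (ls'.takeWhile notH2).length - (nextHeading ls k + 1))
            = (ls'.takeWhile notH2).length by omega]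
      exact (takeWhile_eq_take notH2 ls').symm
    rw [altLoop]
    simp only [hjlt, dif_pos, hslice, hgl]
    rw [altLoop_eq ls (nextHeading ls k + 1) (by omega), htl,
        splitRec_eq_cons (ls.drop k) l ls' hd, ← splitRec_dropWhile ls']
    simp [secOf]
termination_by ls.length - k
decreasing_by omega

-- body lines agree
theorem altBodyGo_eq (ls : List String) :
    altBodyGo ls = (stripH1Go ls).map PySem.Str.splitlines := by
  induction ls with
  | nil => rfl
  | cons l ls ih =>
    simp only [altBodyGo, stripH1Go]
    split <;> simp [ih]

-- ===== VERDICT (by name: the statement is the Claim_ definition above) =====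
theorem split_h2_sections_spec : Claim_equal_split_h2_sections := by
  intro s _
  unfold Spec_split_h2_sections split_h2_sections split_h2_sections_alt
  have hbody : (altBodyGo (PySem.Str.splitlines s)).getD (PySem.Str.splitlines s)
      = PySem.Str.splitlines (strip_first_h1 s) := by
    rw [altBodyGo_eq]
    unfold strip_first_h1
    cases h : stripH1Go (PySem.Str.splitlines s) <;> simp
  simp only [hbody]
  have hA := foldA_none (PySem.Str.splitlines (strip_first_h1 s)) [] []
  have hB := altLoop_eq (PySem.Str.splitlines (strip_first_h1 s)) 0 (by omega) []
  simp only [List.drop_zero, List.nil_append, List.map_nil] at hA hB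
  rw [hB]
  exact hA
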